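-- pv_equiv track=rewrite | github.com/webis-de/emnlp21-same-sentiment | code/data_prep_sentiment_yelp.py | filter_category_business_lookup_no_overlap
-- ===== SOURCE A (Python) =====
-- def filter_category_business_lookup_no_overlap(lookup_rootcat_bid):
--     """remove duplicates / overlapping businesses"""
--     lookup_rootcat_bid_no_overlap = dict()
--
--     for (title, alias), businesses in lookup_rootcat_bid.items():
--         # collect business ids from other categories
--         businesses_other = set()
--         for (title2, alias2), businesses2 in lookup_rootcat_bid.items():
--             if alias2 == alias:
--                 continue
--             businesses_other |= businesses2
--
--         # remove other businesses
--         businesses_no_overlap = businesses - businesses_other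
--
--         lookup_rootcat_bid_no_overlap[(title, alias)] = businesses_no_overlap
--
--     return lookup_rootcat_bid_no_overlap
-- ===== SOURCE B (Python) =====
-- def filter_category_business_lookup_no_overlap(lookup_rootcat_bid):
--     """remove duplicates / overlapping businesses (one-pass ownership map)"""
--     # owner[bid] = its alias if every category containing bid has that alias, else None
--     owner = {}
--     for (title, alias), businesses in lookup_rootcat_bid.items():
--         for b in businesses:
--             if b not in owner:
--                 owner[b] = alias
--             elif owner[b] != alias:
--                 owner[b] = None
--     return {(title, alias): {b for b in businesses if owner[b] == alias}
--             for (title, alias), businesses in lookup_rootcat_bid.items()}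
-- ===== Notes on version B (the rewrite author's own statement) =====
-- stated objective: faster
-- what changed: Instead of re-unioning all other categories' businesses for every category (quadratic in the number of categories), B builds in one pass an ownership map bid -> its alias (or None once seen under two aliases) and keeps a bid iff its owner alias equals the entry's alias.
import Mathlib
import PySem

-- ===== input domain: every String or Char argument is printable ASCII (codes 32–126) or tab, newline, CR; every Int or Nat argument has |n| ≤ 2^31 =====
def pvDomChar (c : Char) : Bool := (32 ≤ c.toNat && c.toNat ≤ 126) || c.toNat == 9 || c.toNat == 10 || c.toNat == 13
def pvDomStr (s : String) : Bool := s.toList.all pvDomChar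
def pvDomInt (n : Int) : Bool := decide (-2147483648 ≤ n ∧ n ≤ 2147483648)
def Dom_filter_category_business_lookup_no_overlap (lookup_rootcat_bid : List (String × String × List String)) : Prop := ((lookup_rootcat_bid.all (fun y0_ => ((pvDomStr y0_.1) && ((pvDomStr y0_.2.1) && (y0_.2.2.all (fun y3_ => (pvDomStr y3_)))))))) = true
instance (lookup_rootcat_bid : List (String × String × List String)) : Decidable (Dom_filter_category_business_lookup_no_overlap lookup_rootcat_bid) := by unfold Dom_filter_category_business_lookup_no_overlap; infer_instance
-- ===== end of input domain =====

-- B replaces A's quadratic per-category union of all other categories' businesses by a single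
-- pass building an ownership map bid → (its unique alias, or None on conflict); objective: faster.

-- ===== PORT A =====
-- for each entry: union the businesses of every entry with a DIFFERENT alias, then set-subtract
def filter_category_business_lookup_no_overlap (lookup_rootcat_bid : List (String × String × List String)) : List (String × String × List String) :=
  lookup_rootcat_bid.map (fun e =>
    (e.1, e.2.1, PySem.Set.diff e.2.2
      (lookup_rootcat_bid.foldl
        (fun acc e2 => if e2.2.1 == e.2.1 then acc else PySem.Set.union acc e2.2.2)
        PySem.Set.empty)))

-- ===== PORT B =====
-- one inner-loop step of B: owner[b] := alias if fresh, None if a different alias was recorded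
def pvOwnerStep (a : String) (d : PySem.Dict String (Option String)) (b : String) :
    PySem.Dict String (Option String) :=
  match PySem.Dict.get? d b with
  | none => d.insert b (some a)
  | some v => if v == some a then d else d.insert b none

-- B's first pass: the ownership map
def pvOwner (lookup_rootcat_bid : List (String × String × List String)) : PySem.Dict String (Option String) :=
  lookup_rootcat_bid.foldl (fun d e => e.2.2.foldl (pvOwnerStep e.2.1) d) PySem.Dict.empty

def filter_category_business_lookup_no_overlap_alt (lookup_rootcat_bid : List (String × String × List String)) : List (String × String × List String) :=
  lookup_rootcat_bid.map (fun e =>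
    (e.1, e.2.1, e.2.2.filter
      (fun b => PySem.Dict.getD (pvOwner lookup_rootcat_bid) b none == some e.2.1)))

-- ===== PRECONDITION & SPEC =====
def Spec_filter_category_business_lookup_no_overlap (lookup_rootcat_bid : List (String × String × List String)) (out : List (String × String × List String)) : Prop := out = filter_category_business_lookup_no_overlap_alt lookup_rootcat_bid
instance (lookup_rootcat_bid : List (String × String × List String)) (out : List (String × String × List String)) : Decidable (Spec_filter_category_business_lookup_no_overlap lookup_rootcat_bid out) := by unfold Spec_filter_category_business_lookup_no_overlap; infer_instance

-- ===== CLAIM (what is proved, stated in full; the proofs are below) =====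
def Claim_equal_filter_category_business_lookup_no_overlap : Prop := ∀ (lookup_rootcat_bid : List (String × String × List String)), Dom_filter_category_business_lookup_no_overlap lookup_rootcat_bid → Spec_filter_category_business_lookup_no_overlap lookup_rootcat_bid (filter_category_business_lookup_no_overlap lookup_rootcat_bid)

-- ===== LEMMAS AND PROOFS =====

-- abstract effect of one ownership update on the value stored at a single key
def pvG (cur : Option (Option String)) (a : String) : Option (Option String) :=
  match cur with
  | none => some (some a)
  | some v => if v == some a then some v else some none

theorem pvOwnerStep_get? (a : String) (d : PySem.Dict String (Option String)) (x b : String) :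
    PySem.Dict.get? (pvOwnerStep a d x) b = if b = x then pvG (PySem.Dict.get? d x) a else PySem.Dict.get? d b := by
  unfold pvOwnerStep pvG
  cases h : PySem.Dict.get? d x with
  | none => simp [PySem.Dict.get?_insert]
  | some v =>
      dsimp only
      by_cases hv : (v == some a) = true
      · simp only [if_pos hv]
        by_cases hb : b = x
        · subst hb; simp [h]
        · simp [hb]
      · simp only [if_neg hv]
        rw [PySem.Dict.get?_insert]

-- the inner loop over one entry's business set touches key b at most once (pvG is idempotent)
theorem pvInner_get? (a : String) (bs : List String) (d : PySem.Dict String (Option String)) (b : String) :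
    PySem.Dict.get? (bs.foldl (pvOwnerStep a) d) b
      = if b ∈ bs then pvG (PySem.Dict.get? d b) a else PySem.Dict.get? d b := by
  induction bs generalizing d with
  | nil => simp
  | cons x xs ih =>
      simp only [List.foldl_cons, ih, pvOwnerStep_get?]
      by_cases hb : b = x
      · subst hb
        by_cases hm : b ∈ xs
        · simp only [hm, List.mem_cons, true_or, if_pos]
          unfold pvG
          cases PySem.Dict.get? d b with
          | none => simp
          | some v =>
              by_cases hv : v == some a
              · simp [hv]
              · simp [hv]
        · simp [hm]
      · simp [hb, List.mem_cons]

-- the outer loop: the value stored at b is the pvG-fold over the aliases of entries containing b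
theorem pvOuter_get? (l : List (String × String × List String)) (d : PySem.Dict String (Option String)) (b : String) :
    PySem.Dict.get? (l.foldl (fun d e => e.2.2.foldl (pvOwnerStep e.2.1) d) d) b
      = List.foldl pvG (PySem.Dict.get? d b)
          ((l.filter (fun e => decide (b ∈ e.2.2))).map (fun e => e.2.1)) := by
  induction l generalizing d with
  | nil => simp
  | cons e l ih =>
      simp only [List.foldl_cons, ih, pvInner_get?]
      by_cases hm : b ∈ e.2.2
      · simp [hm]
      · simp [hm]

theorem pvFoldG_someNone (as : List String) : List.foldl pvG (some none) as = some none := by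
  induction as with
  | nil => rfl
  | cons x xs ih => simpa [pvG] using ih

theorem pvFoldG_someSome (as : List String) (c : String) :
    List.foldl pvG (some (some c)) as = if ∀ x ∈ as, x = c then some (some c) else some none := by
  induction as with
  | nil => simp
  | cons x xs ih =>
      by_cases hx : x = c
      · subst hx
        simp only [List.foldl_cons, pvG]
        simp [ih]
      · have hcx : ¬ c = x := fun h => hx h.symm
        simp only [List.foldl_cons, pvG]
        simp [hcx, hx, pvFoldG_someNone]

theorem pvFoldG_char (as : List String) (a : String) (ha : a ∈ as) :
    (List.foldl pvG none as = some (some a)) ↔ ∀ x ∈ as, x = a := by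
  cases as with
  | nil => simp at ha
  | cons x xs =>
      have h1 : List.foldl pvG none (x :: xs) = List.foldl pvG (some (some x)) xs := rfl
      rw [h1, pvFoldG_someSome]
      by_cases hall : ∀ y ∈ xs, y = x
      · rw [if_pos hall]
        constructor
        · intro h
          have hxa : x = a := by simpa using h
          intro y hy
          rcases List.mem_cons.mp hy with heq | hy
          · rw [heq, hxa]
          · rw [hall y hy, hxa]
        · intro h
          simp [h x (by simp)]
      · rw [if_neg hall]
        constructor
        · intro h; simp at h
        · intro h
          exfalso; apply hall
          intro y hy
          rw [h y (by simp [hy]), h x (by simp)]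

-- membership in A's accumulated union of the other categories' businesses
theorem pvOthers_mem (l : List (String × String × List String)) (a : String) (acc : PySem.Set String) (y : String) :
    y ∈ l.foldl (fun acc e2 => if e2.2.1 == a then acc else PySem.Set.union acc e2.2.2) acc
      ↔ y ∈ acc ∨ ∃ e2 ∈ l, e2.2.1 ≠ a ∧ y ∈ e2.2.2 := by
  induction l generalizing acc with
  | nil => simp
  | cons e l ih =>
      simp only [List.foldl_cons]
      by_cases h : e.2.1 = a
      · rw [if_pos (by simp [h]), ih]
        constructor
        · rintro (hy | ⟨e2, he2, hne, hm⟩)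
          · exact Or.inl hy
          · exact Or.inr ⟨e2, by simp [he2], hne, hm⟩
        · rintro (hy | ⟨e2, he2, hne, hm⟩)
          · exact Or.inl hy
          · rcases List.mem_cons.mp he2 with heq | he2
            · exact (hne (by rw [heq, h])).elim
            · exact Or.inr ⟨e2, he2, hne, hm⟩
      · rw [if_neg (by simp [h]), ih]
        constructor
        · rintro (hy | ⟨e2, he2, hne, hm⟩)
          · rcases (PySem.Set.mem_union _ _ _).mp hy with hy | hy
            · exact Or.inl hy
            · exact Or.inr ⟨e, by simp, h, hy⟩
          · exact Or.inr ⟨e2, by simp [he2], hne, hm⟩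
        · rintro (hy | ⟨e2, he2, hne, hm⟩)
          · exact Or.inl ((PySem.Set.mem_union _ _ _).mpr (Or.inl hy))
          · rcases List.mem_cons.mp he2 with heq | he2
            · exact Or.inl ((PySem.Set.mem_union _ _ _).mpr (Or.inr (heq ▸ hm)))
            · exact Or.inr ⟨e2, he2, hne, hm⟩

-- ===== VERDICT (by name: the statement is the Claim_ definition above) =====
theorem filter_category_business_lookup_no_overlap_spec : Claim_equal_filter_category_business_lookup_no_overlap := by
  intro l _
  unfold Spec_filter_category_business_lookup_no_overlap
  unfold filter_category_business_lookup_no_overlap filter_category_business_lookup_no_overlap_alt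
  apply List.map_congr_left
  intro e he
  refine congrArg (fun z => (e.1, e.2.1, z)) ?_
  -- Set.diff is definitionally a filter; compare the two filters of e.2.2 pointwise
  show List.filter _ e.2.2 = List.filter _ e.2.2
  apply List.filter_congr
  intro b hb
  have hbm : b ∈ e.2.2 := hb
  -- A's predicate: b is in no entry with a different alias
  have hA : (!(PySem.Set.contains
        (l.foldl (fun acc e2 => if e2.2.1 == e.2.1 then acc else PySem.Set.union acc e2.2.2) PySem.Set.empty) b))
      = true ↔ ¬ ∃ e2 ∈ l, e2.2.1 ≠ e.2.1 ∧ b ∈ e2.2.2 := by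
    simp only [Bool.not_eq_true', ← Bool.not_eq_true, PySem.Set.contains_iff, pvOthers_mem]
    simp [PySem.Set.empty]
  -- B's predicate: every entry containing b has this alias
  have hB : (PySem.Dict.getD (pvOwner l) b none == some e.2.1) = true
      ↔ ∀ e2 ∈ l, b ∈ e2.2.2 → e2.2.1 = e.2.1 := by
    unfold pvOwner
    rw [PySem.Dict.getD_eq_get?_getD, pvOuter_get?, PySem.Dict.get?_empty]
    have hmem : e.2.1 ∈ (l.filter (fun e2 => decide (b ∈ e2.2.2))).map (fun e2 => e2.2.1) :=
      List.mem_map.mpr ⟨e, List.mem_filter.mpr ⟨he, by simpa using hbm⟩, rfl⟩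
    have hch := pvFoldG_char ((l.filter (fun e2 => decide (b ∈ e2.2.2))).map (fun e2 => e2.2.1)) e.2.1 hmem
    cases hc : List.foldl pvG none ((l.filter (fun e2 => decide (b ∈ e2.2.2))).map (fun e2 => e2.2.1)) with
    | none =>
        exfalso
        cases hl : (l.filter (fun e2 => decide (b ∈ e2.2.2))).map (fun e2 => e2.2.1) with
        | nil => rw [hl] at hmem; simp at hmem
        | cons x xs =>
            rw [hl] at hc
            have h1 : List.foldl pvG none (x :: xs) = List.foldl pvG (some (some x)) xs := rfl
            rw [h1, pvFoldG_someSome] at hc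
            split_ifs at hc
    | some v =>
        rw [hc] at hch
        simp only [Option.getD_some]
        constructor
        · intro hv
          have hveq : v = some e.2.1 := by simpa using hv
          subst hveq
          intro e2 he2 hbm2
          exact hch.mp rfl e2.2.1 (List.mem_map.mpr ⟨e2, List.mem_filter.mpr ⟨he2, by simpa using hbm2⟩, rfl⟩)
        · intro hall
          have hvv : some v = some (some e.2.1) := hch.mpr (by
            intro x hx
            rcases List.mem_map.mp hx with ⟨e2, he2, rfl⟩
            rcases List.mem_filter.mp he2 with ⟨he2l, hbm2⟩
            exact hall e2 he2l (by simpa using hbm2))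
          simp [Option.some.inj hvv]
  show (!(PySem.Set.contains _ b)) = (PySem.Dict.getD (pvOwner l) b none == some e.2.1)
  by_cases hcase : ∀ e2 ∈ l, b ∈ e2.2.2 → e2.2.1 = e.2.1
  · have h1 : ¬ ∃ e2 ∈ l, e2.2.1 ≠ e.2.1 ∧ b ∈ e2.2.2 := by
      rintro ⟨e2, he2, hne, hm⟩; exact hne (hcase e2 he2 hm)
    rw [hA.mpr h1, hB.mpr hcase]
  · have h2 : (!(PySem.Set.contains
        (l.foldl (fun acc e2 => if e2.2.1 == e.2.1 then acc else PySem.Set.union acc e2.2.2) PySem.Set.empty) b)) ≠ true := by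
      intro ht
      apply hcase
      intro e2 he2 hm
      by_contra hne
      exact (hA.mp ht) ⟨e2, he2, hne, hm⟩
    have h3 : (PySem.Dict.getD (pvOwner l) b none == some e.2.1) ≠ true :=
      fun ht => hcase (hB.mp ht)
    rw [Bool.eq_false_iff.mpr h2, Bool.eq_false_iff.mpr h3]
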